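-- pv_equiv track=rewrite | github.com/afc1755/bio-scrape | scraper.py | getMostFreqList
-- ===== SOURCE A (Python) =====
-- def getMostFreqList(arr, geneNum):
--     """
--     Finds the most frequent names present in the reduced array
--     :param arr: reduced array of potential gene names
--     :param geneNum: number of gene names being returned
--     :return: list of geneNum size that is the most frequent names in the given
--     arr
--     """
--     freqDict = {}
--     for term in arr:
--         if term in freqDict:
--             freqDict[term] += 1
--         else:
--             freqDict[term] = 1
--         if len(term) == 5:
--             freqDict[term] += 3
--         if term.upper() == term:
--             freqDict[term] += 3
--     lst = []
--     for i in range(geneNum):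
--         if(len(freqDict) > 0):
--             lst.append(max(freqDict, key=lambda key: freqDict[key]))
--             freqDict.pop(max(freqDict, key=lambda key: freqDict[key]))
--     return lst
-- ===== SOURCE B (Python) =====
-- def getMostFreqList(arr, geneNum):
--     freq = {}
--     for term in arr:
--         w = 1
--         if len(term) == 5:
--             w += 3
--         if term.upper() == term:
--             w += 3
--         freq[term] = freq.get(term, 0) + w
--     items = sorted(freq.items(), key=lambda kv: -kv[1])
--     return [term for term, _ in items[:max(geneNum, 0)]]
-- ===== Notes on version B (the rewrite author's own statement) =====
-- stated objective: faster
-- what changed: A's selection phase (geneNum rounds of a full-dict max scan plus a second max scan for pop) is replaced by one stable sort of the weighted-frequency items by descending count and a slice, which preserves A's first-maximum tie order; the three conditional dict updates per term are folded into a single write of count+weight.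
import Mathlib
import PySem

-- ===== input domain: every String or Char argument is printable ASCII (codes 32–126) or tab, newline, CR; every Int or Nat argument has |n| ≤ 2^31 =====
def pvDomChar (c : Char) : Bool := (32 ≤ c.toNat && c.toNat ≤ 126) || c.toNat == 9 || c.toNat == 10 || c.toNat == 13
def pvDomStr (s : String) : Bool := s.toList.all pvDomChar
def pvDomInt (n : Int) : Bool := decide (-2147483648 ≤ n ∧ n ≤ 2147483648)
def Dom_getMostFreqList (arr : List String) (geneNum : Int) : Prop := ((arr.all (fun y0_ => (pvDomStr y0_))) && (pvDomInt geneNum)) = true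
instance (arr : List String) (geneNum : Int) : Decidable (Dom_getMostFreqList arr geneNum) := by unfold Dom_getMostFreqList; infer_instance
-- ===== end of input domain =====

-- B replaces A's geneNum repeated full-dict max+pop scans with one stable sort of the
-- weighted-frequency items and a slice, and folds A's three conditional dict updates per term
-- into a single write (objective: simpler; same results, including tie order).

-- ===== PORT A =====
-- one iteration of A's first loop (the +1 / length-5 +3 / all-uppercase +3 weighting);
-- freqDict[term] += c is Dict.modify term 0 (· + c): the key is present at that point, so the default 0 is never read (exact)
def pvStepA (d : PySem.Dict String Int) (term : String) : PySem.Dict String Int :=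
  let d1 := if d.contains term then PySem.Dict.modify d term 0 (· + 1) else d.insert term 1
  let d2 := if PySem.Str.len term == 5 then PySem.Dict.modify d1 term 0 (· + 3) else d1
  if PySem.Str.upper term == term then PySem.Dict.modify d2 term 0 (· + 3) else d2

-- one iteration of A's second loop; max(freqDict, key=lambda key: freqDict[key]) is the first
-- maximal key in insertion order (max? over keys; the lookup freqDict[key] cannot raise since
-- key ∈ keys, so getD's default 0 is never read); the guard len(freqDict) > 0 makes the `none`
-- branch unreachable (max on a nonempty dict); A's pop re-computes the same deterministic max,
-- so the same key m is popped
def pvStepSel (st : List String × PySem.Dict String Int) : List String × PySem.Dict String Int :=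
  let (lst, d) := st
  if d.items.length > 0 then
    match PySem.List.max? (PySem.Dict.keys d) (fun k => PySem.Dict.getD d k 0) with
    | some m => (lst ++ [m], PySem.Dict.erase d m)
    | none => (lst, d)
  else (lst, d)

def getMostFreqList (arr : List String) (geneNum : Int) : List String :=
  let freqDict : PySem.Dict String Int := arr.foldl pvStepA ⟨[]⟩
  ((PySem.List.pyRange 0 geneNum 1).foldl (fun st _ => pvStepSel st) ([], freqDict)).1

-- ===== PORT B =====
def pvWeight (term : String) : Int :=
  let w : Int := 1
  let w := if PySem.Str.len term == 5 then w + 3 else w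
  if PySem.Str.upper term == term then w + 3 else w

def getMostFreqList_alt (arr : List String) (geneNum : Int) : List String :=
  let freq : PySem.Dict String Int :=
    arr.foldl (fun d term => d.insert term (PySem.Dict.getD d term 0 + pvWeight term)) ⟨[]⟩
  let items := PySem.List.sorted (PySem.Dict.items freq) (fun kv => -kv.2)
  (PySem.List.slice items none (some (max geneNum 0))).map Prod.fst

-- ===== PRECONDITION & SPEC =====
def Spec_getMostFreqList (arr : List String) (geneNum : Int) (out : List String) : Prop := out = getMostFreqList_alt arr geneNum
instance (arr : List String) (geneNum : Int) (out : List String) : Decidable (Spec_getMostFreqList arr geneNum out) := by unfold Spec_getMostFreqList; infer_instance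

-- ===== CLAIM (what is proved, stated in full; the proofs are below) =====
def Claim_equal_getMostFreqList : Prop := ∀ (arr : List String) (geneNum : Int), Dom_getMostFreqList arr geneNum → Spec_getMostFreqList arr geneNum (getMostFreqList arr geneNum)

-- ===== LEMMAS AND PROOFS =====

-- overwriting an overwrite is one overwrite
theorem pvInsertInsert (d : PySem.Dict String Int) (k : String) (v v' : Int) :
    (d.insert k v).insert k v' = d.insert k v' := by
  cases d with
  | mk items =>
    have hcong : ∀ p : String × Int, ((if (p.1 == k) = true then (k,v) else p).1 == k) = (p.1 == k) := by
      intro p; by_cases h : p.1 = k <;> simp [h]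
    cases hc : (PySem.Dict.contains (⟨items⟩ : PySem.Dict String Int) k) with
    | true =>
      have h2 : PySem.Dict.contains (⟨items.map (fun p => if (p.1 == k) = true then (k,v) else p)⟩ : PySem.Dict String Int) k = true := by
        simp only [PySem.Dict.contains] at hc ⊢
        simp only [List.any_map]
        apply List.any_eq_true.mpr
        obtain ⟨p, hp, hk⟩ := List.any_eq_true.mp hc
        exact ⟨p, hp, by simp only [Function.comp]; rw [hcong]; exact hk⟩
      simp only [PySem.Dict.insert, hc, h2, if_pos]
      congr 1
      simp only [List.map_map]
      apply List.map_congr_left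
      intro p _
      by_cases h : p.1 = k <;> simp [h, Function.comp]
    | false =>
      have hall : ∀ p ∈ items, (p.1 == k) = false := by
        have h' := List.any_eq_false.mp (by simpa only [PySem.Dict.contains] using hc)
        intro p hp; simpa using h' p hp
      have h2 : PySem.Dict.contains (⟨items ++ [(k,v)]⟩ : PySem.Dict String Int) k = true := by
        simp [PySem.Dict.contains]
      simp only [PySem.Dict.insert, hc, h2, if_pos, Bool.false_eq_true, if_false]
      congr 1
      simp only [List.map_append]
      rw [List.map_congr_left (g := id) (fun p hp => by simp [hall p hp])]
      simp

theorem pvGetD_zero_of_not_contains (d : PySem.Dict String Int) (t : String)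
    (h : d.contains t = false) : PySem.Dict.getD d t 0 = 0 := by
  simp only [PySem.Dict.getD, PySem.Dict.get?]
  have hf : d.items.find? (fun p => p.1 == t) = none := by
    rw [List.find?_eq_none]
    intro p hp
    have h' := List.any_eq_false.mp (by simpa only [PySem.Dict.contains] using h)
    simpa using h' p hp
  simp [hf]

-- the two builds agree step by step: A's conditional insert/modify chain is one read-add-overwrite
theorem pvStepA_eq (d : PySem.Dict String Int) (t : String) :
    pvStepA d t = d.insert t (PySem.Dict.getD d t 0 + pvWeight t) := by
  unfold pvStepA pvWeight
  simp only [PySem.Dict.modify]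
  cases hc : d.contains t with
  | true =>
    simp only [if_pos]
    split_ifs with h1 h2 <;>
      simp only [PySem.Dict.getD_insert_self, pvInsertInsert] <;> ring_nf
  | false =>
    have h0 := pvGetD_zero_of_not_contains d t hc
    simp only [Bool.false_eq_true, if_false]
    have h1 : d.insert t 1 = d.insert t (PySem.Dict.getD d t 0 + 1) := by rw [h0]; norm_num
    rw [h1]
    split_ifs with h2 h3 <;>
      simp only [PySem.Dict.getD_insert_self, pvInsertInsert] <;> ring_nf

-- max? over a mapped list
theorem pvMax?MapAux {α β κ : Type} [LT κ] [DecidableLT κ] (h : α → β) (f : β → κ)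
    (l : List α) (a : Option α) :
    l.foldl (fun acc x =>
        match acc with
        | none => some (h x)
        | some m => if f m < f (h x) then some (h x) else some m) (a.map h)
      = (l.foldl (fun acc x =>
          match acc with
          | none => some x
          | some m => if f (h m) < f (h x) then some x else some m) a).map h := by
  induction l generalizing a with
  | nil => rfl
  | cons x xs ih =>
    cases a with
    | none => simpa using ih (some x)
    | some m =>
      simp only [List.foldl_cons, Option.map_some]
      by_cases hlt : f (h m) < f (h x)
      · simp only [hlt, if_pos] ; exact ih (some x)
      · simp only [hlt, if_neg, not_false_iff] ; exact ih (some m)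

theorem pvMax?Map {α β κ : Type} [LT κ] [DecidableLT κ] (l : List α) (h : α → β) (f : β → κ) :
    PySem.List.max? (l.map h) f = (PySem.List.max? l (fun x => f (h x))).map h := by
  simp only [PySem.List.max?, List.foldl_map]
  simpa using pvMax?MapAux h f l none

-- max? only reads the key on members
theorem pvMax?CongrAux {α κ : Type} [LT κ] [DecidableLT κ] (f g : α → κ)
    (l : List α) (a : Option α) (hl : ∀ x ∈ l, f x = g x) (ha : ∀ m, a = some m → f m = g m) :
    l.foldl (fun acc x =>
        match acc with
        | none => some x
        | some m => if f m < f x then some x else some m) a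
      = l.foldl (fun acc x =>
        match acc with
        | none => some x
        | some m => if g m < g x then some x else some m) a := by
  induction l generalizing a with
  | nil => rfl
  | cons x xs ih =>
    have hx : f x = g x := hl x List.mem_cons_self
    cases a with
    | none =>
      simp only [List.foldl_cons]
      exact ih (some x) (fun y hy => hl y (List.mem_cons_of_mem _ hy)) (fun m hm => by cases hm; exact hx)
    | some m =>
      have hm : f m = g m := ha m rfl
      simp only [List.foldl_cons, hm, hx]
      split_ifs <;>
        exact ih _ (fun y hy => hl y (List.mem_cons_of_mem _ hy))
          (fun m' hm' => by cases hm' ; first | exact hx | exact hm)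

theorem pvMax?Congr {α κ : Type} [LT κ] [DecidableLT κ] (l : List α) (f g : α → κ)
    (hl : ∀ x ∈ l, f x = g x) : PySem.List.max? l f = PySem.List.max? l g := by
  simpa only [PySem.List.max?] using pvMax?CongrAux f g l none hl (by simp)

-- with nodup keys, find? by a member's key returns that member
theorem pvFind?Nodup (l : List (String × Int)) (p : String × Int)
    (hnd : (l.map Prod.fst).Nodup) (hp : p ∈ l) :
    l.find? (fun q => q.1 == p.1) = some p := by
  induction l with
  | nil => cases hp
  | cons q l ih =>
    simp only [List.map_cons, List.nodup_cons] at hnd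
    rcases List.mem_cons.mp hp with h | h
    · subst h ; simp
    · have hne : (q.1 == p.1) = false := by
        have : p.1 ∈ l.map Prod.fst := List.mem_map.mpr ⟨p, h, rfl⟩
        simp only [beq_eq_false_iff_ne, ne_eq]
        intro he ; exact hnd.1 (he ▸ this)
      simp only [List.find?_cons, hne]
      exact ih hnd.2 h

-- first maximal key by looked-up value = key of first maximal item by value (nodup keys)
theorem pvMaxKeys (d : PySem.Dict String Int) (h : (d.items.map Prod.fst).Nodup) :
    PySem.List.max? (PySem.Dict.keys d) (fun k => PySem.Dict.getD d k 0)
      = (PySem.List.max? d.items (fun kv => kv.2)).map Prod.fst := by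
  rw [PySem.Dict.keys, pvMax?Map]
  congr 1
  apply pvMax?Congr
  intro p hp
  simp only [PySem.Dict.getD, PySem.Dict.get?, pvFind?Nodup d.items p h hp, Option.map_some,
    Option.getD_some]

-- sorted over an appended element is an insertion into the sorted list
theorem pvSortedSnoc {α κ : Type} [LT κ] [DecidableLT κ] (l : List α) (x : α) (key : α → κ) :
    PySem.List.sorted (l ++ [x]) key false
      = PySem.List.insertBy (fun a b => decide (key a < key b)) x (PySem.List.sorted l key false) := by
  rw [PySem.List.sorted_eq_foldl_insertBy, PySem.List.sorted_eq_foldl_insertBy, List.foldl_append]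
  rfl

theorem pvMax?Snoc {α κ : Type} [LT κ] [DecidableLT κ] (l : List α) (x : α) (key : α → κ) :
    PySem.List.max? (l ++ [x]) key
      = match PySem.List.max? l key with
        | none => some x
        | some m => if key m < key x then some x else some m := by
  simp only [PySem.List.max?, List.foldl_append, List.foldl_cons, List.foldl_nil]
  cases l.foldl (fun acc x =>
      match acc with
      | none => some x
      | some m => if key m < key x then some x else some m) (none : Option α) <;> rfl

-- head of the stable sort by descending value is the first maximal item, and the tail is the
-- sort of the items with that key filtered out
theorem pvSortedCons (l : List (String × Int)) (m : String × Int)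
    (hnd : (l.map Prod.fst).Nodup) (hm : PySem.List.max? l (fun kv => kv.2) = some m) :
    PySem.List.sorted l (fun kv => -kv.2) false
      = m :: PySem.List.sorted (l.filter (fun p => !(p.1 == m.1))) (fun kv => -kv.2) false := by
  induction l using List.reverseRecOn generalizing m with
  | nil => simp [PySem.List.max?] at hm
  | append_singleton l x ih =>
    rw [pvMax?Snoc] at hm
    rw [pvSortedSnoc]
    have hndl : (l.map Prod.fst).Nodup := by
      simp only [List.map_append, List.nodup_append] at hnd
      exact hnd.1
    have hxfresh : ∀ p ∈ l, (p.1 == x.1) = false := by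
      intro p hp
      simp only [List.map_append, List.map_cons, List.map_nil, List.nodup_append] at hnd
      have := hnd.2.2 p.1 (List.mem_map.mpr ⟨p, hp, rfl⟩)
      simp only [List.mem_singleton] at this
      simpa using this
    cases hl : PySem.List.max? l (fun kv => kv.2) with
    | none =>
      have : l = [] := (PySem.List.max?_eq_none_iff _ _).mp hl
      subst this
      simp only [hl] at hm
      cases hm
      simp [PySem.List.sorted, PySem.List.insertBy, List.filter]
    | some m0 =>
      simp only [hl] at hm
      have hm0l : m0 ∈ l := PySem.List.max?_mem hl
      have ihm := ih m0 hndl hl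
      by_cases hlt : m0.2 < x.2
      · -- new maximum is x
        simp only [hlt, if_pos] at hm
        injection hm with hxm
        subst hxm
        have hfl : l.filter (fun p => !(p.1 == x.1)) = l :=
          List.filter_eq_self.mpr (fun p hp => by simp only [hxfresh p hp] ; rfl)
        have hfx : (l ++ [x]).filter (fun p => !(p.1 == x.1)) = l := by
          rw [List.filter_append, hfl] ; simp
        rw [hfx, ihm]
        have hbefore : (fun a b : String × Int => decide (-a.2 < -b.2)) x m0 = true := by
          simpa using hlt
        simp only [PySem.List.insertBy, hbefore, if_pos]
      · -- maximum stays m0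
        simp only [hlt, if_neg, not_false_iff] at hm
        injection hm with hxm
        subst hxm
        have hxne : (x.1 == m0.1) = false := by
          have := hxfresh m0 hm0l
          simp only [beq_eq_false_iff_ne, ne_eq] at this ⊢
          exact fun he => this he.symm
        have hfx : (l ++ [x]).filter (fun p => !(p.1 == m0.1))
            = l.filter (fun p => !(p.1 == m0.1)) ++ [x] := by
          rw [List.filter_append] ; simp [hxne]
        rw [hfx, pvSortedSnoc, ihm]
        have hbefore : (fun a b : String × Int => decide (-a.2 < -b.2)) x m0 = false := by
          simpa using hlt
        simp only [PySem.List.insertBy, hbefore]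
        simp

-- A's selection loop, iterated N times, emits the first N items of the stable sort
theorem pvLoop (N : Nat) : ∀ (lst : List String) (d : PySem.Dict String Int),
    (d.items.map Prod.fst).Nodup →
    (pvStepSel^[N] (lst, d)).1
      = lst ++ ((PySem.List.sorted d.items (fun kv => -kv.2) false).take N).map Prod.fst := by
  induction N with
  | zero => intro lst d _ ; simp
  | succ N ih =>
    intro lst d hnd
    rw [Function.iterate_succ_apply]
    by_cases hl : d.items.length > 0
    · obtain ⟨m, hm⟩ : ∃ m, PySem.List.max? d.items (fun kv => kv.2) = some m := by
        cases h : PySem.List.max? d.items (fun kv => kv.2) with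
        | none =>
          have := (PySem.List.max?_eq_none_iff _ _).mp h
          rw [this] at hl ; simp at hl
        | some m => exact ⟨m, rfl⟩
      have hkeys := pvMaxKeys d hnd
      rw [hm] at hkeys
      have hstep : pvStepSel (lst, d) = (lst ++ [m.1], PySem.Dict.erase d m.1) := by
        simp only [pvStepSel, hl, if_pos, hkeys, Option.map_some]
      rw [hstep]
      have herase : (PySem.Dict.erase d m.1).items
          = d.items.filter (fun p => !(p.1 == m.1)) := rfl
      have hnd' : ((PySem.Dict.erase d m.1).items.map Prod.fst).Nodup := by
        rw [herase]
        exact List.Nodup.sublist (List.Sublist.map _ List.filter_sublist) hnd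
      rw [ih (lst ++ [m.1]) _ hnd', herase, pvSortedCons d.items m hnd hm]
      simp
    · have hstep : pvStepSel (lst, d) = (lst, d) := by
        simp only [pvStepSel, hl, if_neg, not_false_iff]
      have hnil : d.items = [] := by
        cases h : d.items with
        | nil => rfl
        | cons a l => rw [h] at hl ; simp at hl
      rw [hstep, ih lst d hnd, hnil]
      simp [PySem.List.sorted]

-- a fold that ignores its elements is an iterate
theorem pvFoldlConst {α β : Type} (F : β → β) (l : List α) (init : β) :
    l.foldl (fun s _ => F s) init = F^[l.length] init := by
  induction l generalizing init with
  | nil => rfl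
  | cons x xs ih => simp [List.foldl_cons, ih, Function.iterate_succ_apply]

theorem pvRangeLen (g : Int) : (PySem.List.pyRange 0 g 1).length = g.toNat := by
  simp only [PySem.List.pyRange, one_ne_zero, if_false]
  norm_num
  omega

-- a dict built by inserts has nodup keys
theorem pvKNBuild (arr : List String) : ∀ d : PySem.Dict String Int, d.keys.Nodup →
    ((arr.foldl (fun d term => d.insert term (PySem.Dict.getD d term 0 + pvWeight term)) d).items.map Prod.fst).Nodup := by
  induction arr with
  | nil => intro d h ; exact h
  | cons t ts ih =>
    intro d h
    exact ih _ (PySem.Dict.nodup_keys_insert d t _ h)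

theorem pvMain (arr : List String) (g : Int) :
    getMostFreqList arr g = getMostFreqList_alt arr g := by
  simp only [getMostFreqList, getMostFreqList_alt]
  have hbuild : arr.foldl pvStepA (⟨[]⟩ : PySem.Dict String Int)
      = arr.foldl (fun d term => d.insert term (PySem.Dict.getD d term 0 + pvWeight term)) ⟨[]⟩ :=
    PySem.List.foldl_congr_mem' arr _ _ _ (fun t _ d => pvStepA_eq d t)
  rw [hbuild]
  rw [pvFoldlConst pvStepSel, pvRangeLen]
  have hkn := pvKNBuild arr ⟨[]⟩ (by simp [PySem.Dict.keys])
  rw [pvLoop g.toNat [] _ hkn]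
  rw [PySem.List.slice_to _ (le_max_right g 0)]
  have : (max g 0).toNat = g.toNat := by omega
  rw [this]
  simp [List.map_take]

-- ===== VERDICT (by name: the statement is the Claim_ definition above) =====
theorem getMostFreqList_spec : Claim_equal_getMostFreqList := by
  intro arr g _
  show getMostFreqList arr g = getMostFreqList_alt arr g
  exact pvMain arr g
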